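-- pv_equiv track=rewrite | github.com/GameOver1600/ProgrammingLab | esame.py | hourly_trend_changes
-- ===== SOURCE A (Python) =====
-- def hourly_trend_changes(a):
--     ora = 0
--     prec=[a[0][0],a[0][1],'=']
--     cha = []
--     cha.append(0)
--     for i in range(1, len(a)):
--         if prec[0] // 3600 != a[i][0] // 3600:
--             ora += 1
--             cha.append(0)
--         if prec[2] == '=':
--             if a[i][1] != prec[1] and i != 1:
--                 cha[ora] += 1
--         elif prec[2] == '>':
--             if a[i][1] <= prec[1] and i != 1:
--                 cha[ora] += 1
--         else:
--             if a[i][1] >= prec[1] and i != 1: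
--                 cha[ora] += 1
--         if a[i][1] == prec[1]:
--             prec = [a[i][0], a[i][1], '=']
--         elif a[i][1] > prec[1]:
--             prec = [a[i][0], a[i][1], '>']
--         else:
--             prec = [a[i][0], a[i][1], '<']
--     return cha
-- ===== SOURCE B (Python) =====
-- def hourly_trend_changes(a):
--     # First pass: direction of each consecutive comparison (None at index 0).
--     dirs = [None] + [
--         (0 if a[i][1] == a[i - 1][1] else (1 if a[i][1] > a[i - 1][1] else -1))
--         for i in range(1, len(a))
--     ]
--     # Second pass: bucket by adjacent hour crossings; count direction changes from i>=2 on.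
--     cha = [0]
--     for i in range(1, len(a)):
--         if a[i][0] // 3600 != a[i - 1][0] // 3600:
--             cha.append(0)
--         if i >= 2 and dirs[i] != dirs[i - 1]:
--             cha[-1] += 1
--     return cha
-- ===== Notes on version B (the rewrite author's own statement) =====
-- stated objective: alternative
-- what changed: B first materializes the list of consecutive comparison directions, then a second pass buckets by adjacent hour crossings and counts dirs[i] != dirs[i-1] for i>=2, replacing A's single pass with a mutable prec triple and bucket index.
-- outside the precondition, e.g. on hourly_trend_changes([]): A raises IndexError, B returns [0]
import Mathlib
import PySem

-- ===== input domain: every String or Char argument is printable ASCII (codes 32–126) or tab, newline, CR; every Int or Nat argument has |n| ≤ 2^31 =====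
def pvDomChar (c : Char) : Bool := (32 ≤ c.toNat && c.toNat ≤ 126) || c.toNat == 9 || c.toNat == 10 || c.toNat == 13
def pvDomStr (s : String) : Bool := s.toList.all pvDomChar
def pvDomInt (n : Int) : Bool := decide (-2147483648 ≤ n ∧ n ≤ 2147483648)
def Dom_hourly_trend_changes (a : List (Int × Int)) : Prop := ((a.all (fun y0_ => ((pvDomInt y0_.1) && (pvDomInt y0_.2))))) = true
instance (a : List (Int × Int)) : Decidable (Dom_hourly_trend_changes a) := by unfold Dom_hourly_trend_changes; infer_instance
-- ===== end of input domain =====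

set_option maxHeartbeats 1000000


-- B computes the same bucketed trend-change counts via a materialized direction list and a
-- second pass, instead of A's single pass with a mutable `prec` triple (alternative decomposition).
-- A raises IndexError on the empty list (excluded by Pre_); B returns [0] there.

-- ===== PORT A =====
-- one loop iteration of A; `a.getD i` is exact here because i < a.length for every visited index
def htcStepA (a : List (Int × Int)) (st : Nat × (Int × Int × Char) × List Int) (i : Nat) :
    Nat × (Int × Int × Char) × List Int :=
  let ora := st.1
  let prec := st.2.1
  let cha := st.2.2
  let ai := a.getD i (0, 0)
  let ora2 := if PySem.Int.floordiv prec.1 3600 ≠ PySem.Int.floordiv ai.1 3600 then ora + 1 else ora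
  let cha2 := if PySem.Int.floordiv prec.1 3600 ≠ PySem.Int.floordiv ai.1 3600 then cha ++ [0] else cha
  let cha3 :=
    if prec.2.2 = '=' then
      if ai.2 ≠ prec.2.1 ∧ i ≠ 1 then cha2.modify ora2 (· + 1) else cha2
    else if prec.2.2 = '>' then
      if ai.2 ≤ prec.2.1 ∧ i ≠ 1 then cha2.modify ora2 (· + 1) else cha2
    else
      if ai.2 ≥ prec.2.1 ∧ i ≠ 1 then cha2.modify ora2 (· + 1) else cha2
  let prec2 :=
    if ai.2 = prec.2.1 then (ai.1, ai.2, '=')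
    else if ai.2 > prec.2.1 then (ai.1, ai.2, '>')
    else (ai.1, ai.2, '<')
  (ora2, prec2, cha3)

def hourly_trend_changes (a : List (Int × Int)) : List Int :=
  match a with
  | [] => []   -- Python raises IndexError here; excluded by Pre_
  | a0 :: _ =>
    (List.foldl (htcStepA a) (0, (a0.1, a0.2, '='), [(0 : Int)])
      (List.range' 1 (a.length - 1))).2.2

-- ===== PORT B =====
-- dirs entry: none at index 0, some (0 / 1 / -1) for =, >, < comparisons
def htcDir (v p : Int) : Int := if v = p then 0 else if v > p then 1 else -1

def htcDirs (a : List (Int × Int)) : List (Option Int) :=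
  (List.range a.length).map (fun i =>
    if i = 0 then none
    else some (htcDir (a.getD i (0, 0)).2 (a.getD (i - 1) (0, 0)).2))

-- cha[-1] += 1
def htcBump (cha : List Int) : List Int := cha.dropLast ++ [cha.getLastD 0 + 1]

def htcStepB (a : List (Int × Int)) (dirs : List (Option Int)) (cha : List Int) (i : Nat) :
    List Int :=
  let cha2 :=
    if PySem.Int.floordiv (a.getD i (0, 0)).1 3600 ≠ PySem.Int.floordiv (a.getD (i - 1) (0, 0)).1 3600
    then cha ++ [0] else cha
  if 2 ≤ i ∧ dirs.getD i none ≠ dirs.getD (i - 1) none then htcBump cha2 else cha2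

def hourly_trend_changes_alt (a : List (Int × Int)) : List Int :=
  List.foldl (htcStepB a (htcDirs a)) [(0 : Int)] (List.range' 1 (a.length - 1))

-- ===== PRECONDITION & SPEC =====
-- Pre_ excludes only the empty list, on which Python A raises IndexError at a[0]
def Pre_hourly_trend_changes (a : List (Int × Int)) : Prop := a ≠ []
instance (a : List (Int × Int)) : Decidable (Pre_hourly_trend_changes a) := by
  unfold Pre_hourly_trend_changes; infer_instance

def pvWitness_hourly_trend_changes : (List (Int × Int)) := [(0, 5), (10, 7), (3700, 7)]

def Spec_hourly_trend_changes (a : List (Int × Int)) (out : List Int) : Prop :=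
  out = hourly_trend_changes_alt a
instance (a : List (Int × Int)) (out : List Int) : Decidable (Spec_hourly_trend_changes a out) := by
  unfold Spec_hourly_trend_changes; infer_instance

-- ===== CLAIM (what is proved, stated in full; the proofs are below) =====
def Claim_equal_hourly_trend_changes : Prop := ∀ (a : List (Int × Int)),
  Dom_hourly_trend_changes a → Pre_hourly_trend_changes a →
  Spec_hourly_trend_changes a (hourly_trend_changes a)

-- ===== LEMMAS AND PROOFS =====


-- proof-only helpers: the Int value B's dirs list stores for A's direction symbol
def symVal (c : Char) : Int := if c = '=' then 0 else if c = '>' then 1 else -1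

def InvHTC (a : List (Int × Int)) (i : Nat) (st : Nat × (Int × Int × Char) × List Int)
    (cha : List Int) : Prop :=
  st.2.2 = cha ∧ cha ≠ [] ∧ st.1 = cha.length - 1 ∧
  st.2.1.1 = (a.getD (i - 1) (0, 0)).1 ∧
  st.2.1.2.1 = (a.getD (i - 1) (0, 0)).2 ∧
  (st.2.1.2.2 = '=' ∨ st.2.1.2.2 = '>' ∨ st.2.1.2.2 = '<') ∧
  (2 ≤ i → (htcDirs a).getD (i - 1) none = some (symVal st.2.1.2.2))

theorem dirs_getD (a : List (Int × Int)) (i : Nat) (h : i < a.length) :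
    (htcDirs a).getD i none =
      if i = 0 then none
      else some (htcDir (a.getD i (0, 0)).2 (a.getD (i - 1) (0, 0)).2) := by
  simp [htcDirs, List.getD, h]

theorem modify_last (l : List Int) (h : l ≠ []) :
    l.modify (l.length - 1) (· + 1) = htcBump l := by
  induction l with
  | nil => simp at h
  | cons x t ih =>
    cases t with
    | nil => simp [List.modify, htcBump]
    | cons y u =>
      have := ih (by simp)
      simp only [List.length_cons, Nat.add_sub_cancel] at this ⊢
      have h2 : (y :: u).length = u.length + 1 := by simp
      simpa [List.modify, htcBump, h2] using this

theorem step_inv (a : List (Int × Int)) (i : Nat) (st : Nat × (Int × Int × Char) × List Int)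
    (cha : List Int) (h1 : 1 ≤ i) (h2 : i < a.length) (hinv : InvHTC a i st cha) :
    InvHTC a (i + 1) (htcStepA a st i) (htcStepB a (htcDirs a) cha i) := by
  obtain ⟨ora, ⟨pt, pv, ps⟩, chaA⟩ := st
  obtain ⟨hcha, hne, hora, hpt, hpv, hsym, hdir⟩ := hinv
  simp only at hcha hora hpt hpv hsym hdir
  subst hcha
  set ai := a.getD i (0, 0) with hai
  -- hour-crossing conditions of A and B agree (Ne is symmetric)
  have hhour : (PySem.Int.floordiv ai.1 3600 ≠ PySem.Int.floordiv (a.getD (i - 1) (0, 0)).1 3600)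
      = (PySem.Int.floordiv pt 3600 ≠ PySem.Int.floordiv ai.1 3600) := by
    rw [hpt]; simp [ne_comm]
  set cha2 := if PySem.Int.floordiv pt 3600 ≠ PySem.Int.floordiv ai.1 3600 then chaA ++ [0]
    else chaA with hcha2
  have hne2 : cha2 ≠ [] := by
    rw [hcha2]; split <;> simp_all
  have hlp : 0 < chaA.length := List.length_pos_of_ne_nil hne
  have hlen2 : (if PySem.Int.floordiv pt 3600 ≠ PySem.Int.floordiv ai.1 3600 then ora + 1 else ora)
      = cha2.length - 1 := by
    rw [hcha2]; split <;> simp [hora] <;> omega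
  -- the direction B's list stores at index i
  have hdi : (htcDirs a).getD i none = some (htcDir ai.2 (a.getD (i - 1) (0, 0)).2) := by
    rw [dirs_getD a i h2, if_neg (by omega), hai]
  clear_value ai cha2
  -- count conditions agree; resulting cha lists agree
  have hcount :
      (if ps = '=' then
        if ai.2 ≠ pv ∧ i ≠ 1 then cha2.modify (cha2.length - 1) (· + 1) else cha2
      else if ps = '>' then
        if ai.2 ≤ pv ∧ i ≠ 1 then cha2.modify (cha2.length - 1) (· + 1) else cha2
      else
        if ai.2 ≥ pv ∧ i ≠ 1 then cha2.modify (cha2.length - 1) (· + 1) else cha2)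
      = (if 2 ≤ i ∧ (htcDirs a).getD i none ≠ (htcDirs a).getD (i - 1) none then htcBump cha2
         else cha2) := by
    have hb := modify_last cha2 hne2
    rcases Nat.lt_or_ge i 2 with hi1 | hi2
    · have : i = 1 := by omega
      subst this
      simp
    · have hd := hdir hi2
      rw [hdi, hd, ← hpv]
      simp only [hb]
      rcases hsym with h | h | h <;> subst h <;>
        by_cases hvp : ai.2 = pv <;>
        by_cases hgt : pv < ai.2 <;>
        simp_all [symVal, htcDir, show i ≠ 1 by omega, hi2] <;>
        omega
  refine ⟨?_, ?_, ?_, ?_, ?_, ?_, ?_⟩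
  · simp only [htcStepA, htcStepB, ← hai, hhour, ← hcha2, hlen2, hcount]
  · simp only [htcStepB, ← hai, hhour, ← hcha2]
    split
    · simp [htcBump]
    · exact hne2
  · simp only [htcStepA, htcStepB, ← hai, hhour, ← hcha2, hlen2, hcount]
    split
    · simp [htcBump]
      try omega
    · rfl
  · simp only [htcStepA, ← hai]
    split_ifs <;> simp [hai, List.getD]
  · simp only [htcStepA, ← hai]
    split_ifs <;> simp [hai, List.getD]
  · simp only [htcStepA, ← hai]
    split_ifs <;> simp [hai, List.getD]
  · intro _
    simp only [htcStepA, ← hai, Nat.add_sub_cancel, hdi, ← hpv]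
    split_ifs <;> simp_all [htcDir, symVal] <;> omega

theorem fold_inv (a : List (Int × Int)) (m : Nat) :
    ∀ (i : Nat) (st : Nat × (Int × Int × Char) × List Int) (cha : List Int),
      1 ≤ i → i + m ≤ a.length → InvHTC a i st cha →
      (List.foldl (htcStepA a) st (List.range' i m)).2.2
        = List.foldl (htcStepB a (htcDirs a)) cha (List.range' i m) := by
  induction m with
  | zero => intro i st cha _ _ hinv; simpa using hinv.1
  | succ m ih =>
    intro i st cha h1 h2 hinv
    rw [List.range'_succ]
    simp only [List.foldl_cons]
    exact ih (i + 1) _ _ (by omega) (by omega) (step_inv a i st cha h1 (by omega) hinv)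


-- ===== VERDICT (by name: the statement is the Claim_ definition above) =====
theorem hourly_trend_changes_spec : Claim_equal_hourly_trend_changes := by
  intro a _ hpre
  unfold Spec_hourly_trend_changes
  match a, hpre with
  | a0 :: t, _ =>
    show (List.foldl (htcStepA (a0 :: t)) (0, (a0.1, a0.2, '='), [(0 : Int)])
        (List.range' 1 ((a0 :: t).length - 1))).2.2 = _
    rw [fold_inv (a0 :: t) ((a0 :: t).length - 1) 1 _ [(0 : Int)] (by omega) (by simp; omega)
      (by exact ⟨rfl, by simp, rfl, by simp, by simp, by simp, fun h => absurd h (by omega)⟩)]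
    rfl
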